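-- pv_equiv track=rewrite | github.com/jistr/rejviz | rejviz/nic_mappings.py | _parse_nics_output
-- ===== SOURCE A (Python) =====
-- def _parse_nics_output(output):
--     lines = output.splitlines()
--     nics = []
--     current_nic = {}
--     for i, line in enumerate(lines):
--         # if line is a separator, start a new NIC
--         if line == '@-----':
--             nics.append(current_nic)
--             current_nic = {}
--             continue
--
--         # if line is a key, assign a value
--         if line.startswith('@'):
--             next_line = lines[i + 1] if i + 1 < len(lines) else None
--
--             if next_line and not next_line.startswith('@'):
--                 current_nic[line[1:]] = next_line
--             # if next line is a key again, assign None to the current key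
--             else:
--                 current_nic[line[1:]] = None
--     return nics
-- ===== SOURCE B (Python) =====
-- def _parse_nics_output(output):
--     # Phase 1: cut the lines into one group per '@-----' separator
--     # (the trailing remainder after the last separator is never emitted).
--     blocks = []
--     current = []
--     for line in output.splitlines():
--         if line == '@-----':
--             blocks.append(current)
--             current = []
--         else:
--             current.append(line)
--     # Phase 2: parse each block with a one-pass state machine carrying the
--     # pending key: a key line stores key -> None; a following non-empty,
--     # non-key line overwrites it with the value.
--     nics = []
--     for block in blocks:
--         nic = {}
--         pending = None
--         for line in block:
--             if pending is not None and line and not line.startswith('@'):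
--                 nic[pending] = line
--             if line.startswith('@'):
--                 nic[line[1:]] = None
--                 pending = line[1:]
--             else:
--                 pending = None
--         nics.append(nic)
--     return nics
-- ===== Notes on version B (the rewrite author's own statement) =====
-- stated objective: alternative
-- what changed: A is a single indexed loop with a global lines[i+1] lookahead that also peeks across block boundaries; B first splits the lines into one group per '@-----' separator (dropping the trailing remainder) and then parses each block with a one-pass pending-key state machine (key -> None, overwritten by the next value line), no index arithmetic or lookahead.
import Mathlib
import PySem

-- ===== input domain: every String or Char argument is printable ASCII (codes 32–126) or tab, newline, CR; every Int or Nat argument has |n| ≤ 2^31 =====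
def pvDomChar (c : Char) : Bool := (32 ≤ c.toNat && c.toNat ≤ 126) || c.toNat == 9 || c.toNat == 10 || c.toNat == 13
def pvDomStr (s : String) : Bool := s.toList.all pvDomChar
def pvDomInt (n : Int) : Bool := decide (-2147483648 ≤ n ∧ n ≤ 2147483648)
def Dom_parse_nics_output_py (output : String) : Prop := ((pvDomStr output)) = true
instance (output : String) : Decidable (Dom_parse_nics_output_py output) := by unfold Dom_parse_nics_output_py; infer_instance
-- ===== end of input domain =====

-- B replaces A's indexed loop with global lines[i+1] lookahead by a two-phase
-- decomposition: split into blocks at '@-----', then a pending-key state machine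
-- per block (alternative structure, same O(n) cost).


-- ===== PORT A =====
-- loop body of A: state (nics, current_nic), element (i, line); lookahead lines[i+1]
def pvAStep (lines : List String)
    (st : List (PySem.Dict String (Option String)) × PySem.Dict String (Option String))
    (p : Int × String) :
    List (PySem.Dict String (Option String)) × PySem.Dict String (Option String) :=
  let line := p.2
  if line == "@-----" then (st.1 ++ [st.2], PySem.Dict.empty)
  else if PySem.Str.startswith line "@" then
    -- next_line = lines[i + 1] if i + 1 < len(lines) else None
    let next_line : Option String :=
      if p.1 + 1 < (lines.length : Int) then PySem.List.pyGet? lines (p.1 + 1) else none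
    match next_line with
    | some nl =>
      if nl != "" && !(PySem.Str.startswith nl "@")
      then (st.1, st.2.insert (PySem.Str.slice line (some 1) none) (some nl))
      else (st.1, st.2.insert (PySem.Str.slice line (some 1) none) none)
    | none => (st.1, st.2.insert (PySem.Str.slice line (some 1) none) none)
  else st

def parse_nics_output_py (output : String) : List (List (String × Option String)) :=
  let lines := PySem.Str.splitlines output
  ((PySem.List.enumerate lines).foldl (pvAStep lines) ([], PySem.Dict.empty)).1.map
    (fun d => d.items)

-- ===== PORT B =====
-- phase 1 of B: cut into one group per '@-----' separator (remainder in .2)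
def pvSplitStep (st : List (List String) × List String) (line : String) :
    List (List String) × List String :=
  if line == "@-----" then (st.1 ++ [st.2], []) else (st.1, st.2 ++ [line])

-- phase 2 of B: state (nic, pending key)
def pvBStep (st : PySem.Dict String (Option String) × Option String) (line : String) :
    PySem.Dict String (Option String) × Option String :=
  let nic := match st.2 with
    | some k =>
      if line != "" && !(PySem.Str.startswith line "@") then st.1.insert k (some line) else st.1
    | none => st.1
  if PySem.Str.startswith line "@"
  then (nic.insert (PySem.Str.slice line (some 1) none) none,
        some (PySem.Str.slice line (some 1) none))
  else (nic, none)

def parse_nics_output_py_alt (output : String) : List (List (String × Option String)) :=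
  let blocks := ((PySem.Str.splitlines output).foldl pvSplitStep ([], [])).1
  (blocks.map (fun block => (block.foldl pvBStep (PySem.Dict.empty, none)).1)).map
    (fun d => d.items)

-- ===== PRECONDITION & SPEC =====
def Spec_parse_nics_output_py (output : String) (out : List (List (String × Option String))) : Prop := out = parse_nics_output_py_alt output
instance (output : String) (out : List (List (String × Option String))) : Decidable (Spec_parse_nics_output_py output out) := by unfold Spec_parse_nics_output_py; infer_instance

-- ===== CLAIM (what is proved, stated in full; the proofs are below) =====
def Claim_equal_parse_nics_output_py : Prop := ∀ (output : String), Dom_parse_nics_output_py output → Spec_parse_nics_output_py output (parse_nics_output_py output)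

-- ===== LEMMAS AND PROOFS =====

-- value assigned to a key whose (possible) successor line is next?
def pvLaVal (next? : Option String) : Option String :=
  match next? with
  | some nl => if nl != "" && !(PySem.Str.startswith nl "@") then some nl else none
  | none => none

-- structural reformulation of A's loop: lookahead = head of the remaining lines
def pvALoop (xs : List String)
    (st : List (PySem.Dict String (Option String)) × PySem.Dict String (Option String)) :
    List (PySem.Dict String (Option String)) × PySem.Dict String (Option String) :=
  match xs with
  | [] => st
  | x :: rest =>
    if x == "@-----" then pvALoop rest (st.1 ++ [st.2], PySem.Dict.empty)
    else if PySem.Str.startswith x "@" then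
      pvALoop rest (st.1, st.2.insert (PySem.Str.slice x (some 1) none) (pvLaVal rest.head?))
    else pvALoop rest st

-- cons-recursive characterisation of B's split phase
def pvSplitC (xs : List String) : List (List String) × List String :=
  match xs with
  | [] => ([], [])
  | x :: rest =>
    let r := pvSplitC rest
    if x == "@-----" then ([] :: r.1, r.2)
    else match r.1 with
      | g :: gs => ((x :: g) :: gs, r.2)
      | [] => ([], x :: r.2)

-- lookahead formulation of B's per-block parse
def pvLaLoop (d : PySem.Dict String (Option String)) (xs : List String) :
    PySem.Dict String (Option String) :=
  match xs with
  | [] => d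
  | x :: rest =>
    if PySem.Str.startswith x "@"
    then pvLaLoop (d.insert (PySem.Str.slice x (some 1) none) (pvLaVal rest.head?)) rest
    else pvLaLoop d rest

lemma pvA_bridge : ∀ (cur pre : List String) st,
    (PySem.List.enumerate cur (pre.length : Int)).foldl (pvAStep (pre ++ cur)) st
      = pvALoop cur st := by
  intro cur
  induction cur with
  | nil => intro pre st; simp [PySem.List.enumerate_nil, pvALoop]
  | cons x rest ih =>
    intro pre st
    rw [PySem.List.enumerate_cons, List.foldl_cons]
    have hnext : (if (pre.length : Int) + 1 < (((pre ++ x :: rest).length : Nat) : Int)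
        then PySem.List.pyGet? (pre ++ x :: rest) ((pre.length : Int) + 1) else none)
        = rest.head? := by
      cases rest with
      | nil =>
        have : ¬ ((pre.length : Int) + 1 < (((pre ++ [x]).length : Nat) : Int)) := by
          simp
        rw [if_neg this]
        rfl
      | cons y r =>
        have hlt : (pre.length : Int) + 1 < (((pre ++ x :: y :: r).length : Nat) : Int) := by
          have h2 : (pre ++ x :: y :: r).length = pre.length + (r.length + 2) := by simp
          rw [h2]; push_cast; omega
        have hcast : (pre.length : Int) + 1 = ((pre.length + 1 : Nat) : Int) := by push_cast; ring
        rw [if_pos hlt, hcast, PySem.List.pyGet?_natCast]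
        rw [show pre ++ x :: y :: r = (pre ++ [x]) ++ y :: r by simp]
        rw [show pre.length + 1 = (pre ++ [x]).length + 0 by simp]
        simp
    have hre : pre ++ x :: rest = (pre ++ [x]) ++ rest := by simp
    have hlen : (pre.length : Int) + 1 = (((pre ++ [x]).length : Nat) : Int) := by
      simp
    have ih' := fun st' => ih (pre ++ [x]) st'
    by_cases hsep : x = "@-----"
    · subst hsep
      rw [show pvAStep (pre ++ "@-----" :: rest) st ((pre.length : Int), "@-----")
            = (st.1 ++ [st.2], PySem.Dict.empty) by simp [pvAStep]]
      rw [hlen, hre, ih', pvALoop]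
      simp
    · have hsepb : (x == "@-----") = false := by simp [hsep]
      by_cases hat : PySem.Str.startswith x "@"
      · have hatC : PySem.Chars.startswith x.toList ['@'] = true := by
          rw [show ['@'] = "@".toList from rfl, ← PySem.Str.startswith_eq]; exact hat
        have hatC' : PySem.Chars.startswith x.toList "@".toList = true := by
          rw [← PySem.Str.startswith_eq]; exact hat
        rw [show pvAStep (pre ++ x :: rest) st ((pre.length : Int), x)
              = (st.1, st.2.insert (PySem.Str.slice x (some 1) none) (pvLaVal rest.head?)) by
            simp only [pvAStep, hsepb, Bool.false_eq_true, if_false,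
              PySem.Str.startswith_eq, hatC', if_true]
            rw [hnext]
            cases h : rest.head? with
            | none => rfl
            | some nl =>
              simp only [pvLaVal]
              rw [show (nl != "" && !PySem.Chars.startswith nl.toList "@".toList)
                    = (nl != "" && !PySem.Str.startswith nl "@") by
                  rw [PySem.Str.startswith_eq]]
              split <;> rfl]
        rw [hlen, hre, ih', pvALoop]
        simp [hsepb, hatC]
      · have hatC : PySem.Chars.startswith x.toList ['@'] = false := by
          rw [show ['@'] = "@".toList from rfl, ← PySem.Str.startswith_eq]; simpa using hat
        rw [show pvAStep (pre ++ x :: rest) st ((pre.length : Int), x) = st by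
            simp [pvAStep, hsepb, hatC]]
        rw [hlen, hre, ih', pvALoop]
        simp [hsepb, hatC]

lemma pvB_split_bridge : ∀ (xs : List String) gacc cacc,
    xs.foldl pvSplitStep (gacc, cacc) =
      match pvSplitC xs with
      | ([], rem) => (gacc, cacc ++ rem)
      | (g :: gs, rem) => (gacc ++ (cacc ++ g) :: gs, rem) := by
  intro xs
  induction xs with
  | nil => intro gacc cacc; simp [pvSplitC]
  | cons x rest ih =>
    intro gacc cacc
    rw [List.foldl_cons]
    rcases hr : pvSplitC rest with ⟨gs, rem⟩
    by_cases hx : x = "@-----"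
    · subst hx
      rw [show pvSplitStep (gacc, cacc) "@-----" = (gacc ++ [cacc], []) by simp [pvSplitStep]]
      rw [ih, hr]
      simp only [pvSplitC, hr, beq_self_eq_true, if_true]
      cases gs with
      | nil => simp
      | cons g gs' => simp
    · have hxb : (x == "@-----") = false := by simp [hx]
      rw [show pvSplitStep (gacc, cacc) x = (gacc, cacc ++ [x]) by simp [pvSplitStep, hxb]]
      rw [ih, hr]
      simp only [pvSplitC, hr, hxb, Bool.false_eq_true, if_false]
      cases gs with
      | nil => simp
      | cons g gs' => simp

lemma pvB_block_bridge : ∀ (xs : List String),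
    (∀ (d : PySem.Dict String (Option String)), (xs.foldl pvBStep (d, none)).1 = pvLaLoop d xs) ∧
    (∀ (d : PySem.Dict String (Option String)) (k : String), (xs.foldl pvBStep (d.insert k none, some k)).1
        = pvLaLoop (d.insert k (pvLaVal xs.head?)) xs) := by
  intro xs
  induction xs with
  | nil =>
    refine ⟨fun d => rfl, fun d k => ?_⟩
    simp [pvLaLoop, pvLaVal]
  | cons x rest ih =>
    obtain ⟨ihn, ihs⟩ := ih
    constructor
    · intro d
      rw [List.foldl_cons]
      by_cases hx : PySem.Str.startswith x "@"
      · have hxC : PySem.Chars.startswith x.toList ['@'] = true := by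
          rw [show ['@'] = "@".toList from rfl, ← PySem.Str.startswith_eq]; exact hx
        rw [show pvBStep (d, none) x
              = (d.insert (PySem.Str.slice x (some 1) none) none,
                 some (PySem.Str.slice x (some 1) none)) by simp [pvBStep, hxC]]
        rw [ihs]
        simp [pvLaLoop, hxC]
      · have hxC : PySem.Chars.startswith x.toList ['@'] = false := by
          rw [show ['@'] = "@".toList from rfl, ← PySem.Str.startswith_eq]; simpa using hx
        rw [show pvBStep (d, none) x = (d, none) by simp [pvBStep, hxC]]
        rw [ihn]
        simp [pvLaLoop, hxC]
    · intro d k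
      rw [List.foldl_cons]
      by_cases hx : PySem.Str.startswith x "@"
      · have hxC : PySem.Chars.startswith x.toList ['@'] = true := by
          rw [show ['@'] = "@".toList from rfl, ← PySem.Str.startswith_eq]; exact hx
        rw [show pvBStep (d.insert k none, some k) x
              = ((d.insert k none).insert (PySem.Str.slice x (some 1) none) none,
                 some (PySem.Str.slice x (some 1) none)) by simp [pvBStep, hxC]]
        rw [ihs]
        simp [pvLaLoop, pvLaVal, hxC]
      · have hxC : PySem.Chars.startswith x.toList ['@'] = false := by
          rw [show ['@'] = "@".toList from rfl, ← PySem.Str.startswith_eq]; simpa using hx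
        by_cases hxe : x = ""
        · subst hxe
          have hxC2 : PySem.Chars.startswith ([] : List Char) ['@'] = false := by decide
          rw [show pvBStep (d.insert k none, some k) ""
                = (d.insert k none, none) by simp [pvBStep, hxC2]]
          rw [ihn]
          simp [pvLaLoop, pvLaVal, hxC2]
        · rw [show pvBStep (d.insert k none, some k) x
                = (d.insert k (some x), none) by
              simp [pvBStep, hxC, hxe, PySem.Dict.insert_insert_self]]
          rw [ihn]
          simp [pvLaLoop, pvLaVal, hxC, hxe]

lemma pvHead_lemma : ∀ (rest : List String) g gs,
    (pvSplitC rest).1 = g :: gs → pvLaVal rest.head? = pvLaVal g.head? := by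
  intro rest g gs h
  cases rest with
  | nil => simp [pvSplitC] at h
  | cons y r =>
    by_cases hy : y = "@-----"
    · subst hy
      simp only [pvSplitC, beq_self_eq_true, if_true] at h
      obtain ⟨h1, h2⟩ := List.cons_eq_cons.mp h
      subst h1
      exact (by decide : pvLaVal (some "@-----") = pvLaVal none)
    · have hyb : (y == "@-----") = false := by simp [hy]
      simp only [pvSplitC, hyb, Bool.false_eq_true, if_false] at h
      rcases hr1 : (pvSplitC r).1 with _ | ⟨g', gs'⟩
      · rw [hr1] at h; simp at h
      · rw [hr1] at h
        simp at h
        rw [← h.1]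
        rfl

lemma pvMain : ∀ (xs : List String) nics cur,
    (pvALoop xs (nics, cur)).1 =
      nics ++ (match (pvSplitC xs).1 with
               | [] => []
               | g :: gs => pvLaLoop cur g :: gs.map (pvLaLoop PySem.Dict.empty)) := by
  intro xs
  induction xs with
  | nil => intro nics cur; simp [pvALoop, pvSplitC]
  | cons x rest ih =>
    intro nics cur
    by_cases hx : x = "@-----"
    · subst hx
      rw [show pvALoop ("@-----" :: rest) (nics, cur)
            = pvALoop rest (nics ++ [cur], PySem.Dict.empty) by simp [pvALoop]]
      rw [ih]
      simp only [pvSplitC, beq_self_eq_true, if_true]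
      rcases hr1 : (pvSplitC rest).1 with _ | ⟨g, gs⟩
      · simp [pvLaLoop]
      · simp [pvLaLoop]
    · have hxb : (x == "@-----") = false := by simp [hx]
      by_cases hat : PySem.Str.startswith x "@"
      · have hatC : PySem.Chars.startswith x.toList ['@'] = true := by
          rw [show ['@'] = "@".toList from rfl, ← PySem.Str.startswith_eq]; exact hat
        rw [show pvALoop (x :: rest) (nics, cur)
              = pvALoop rest (nics,
                  cur.insert (PySem.Str.slice x (some 1) none) (pvLaVal rest.head?)) by
            simp [pvALoop, hxb, hatC]]
        rw [ih]
        simp only [pvSplitC, hxb, Bool.false_eq_true, if_false]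
        rcases hr1 : (pvSplitC rest).1 with _ | ⟨g, gs⟩
        · simp
        · have hhd := pvHead_lemma rest g gs hr1
          dsimp only
          rw [show pvLaLoop cur (x :: g)
                = pvLaLoop (cur.insert (PySem.Str.slice x (some 1) none) (pvLaVal g.head?)) g by
              simp [pvLaLoop, hatC]]
          rw [hhd]
      · have hatC : PySem.Chars.startswith x.toList ['@'] = false := by
          rw [show ['@'] = "@".toList from rfl, ← PySem.Str.startswith_eq]; simpa using hat
        rw [show pvALoop (x :: rest) (nics, cur) = pvALoop rest (nics, cur) by
            simp [pvALoop, hxb, hatC]]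
        rw [ih]
        simp only [pvSplitC, hxb, Bool.false_eq_true, if_false]
        rcases hr1 : (pvSplitC rest).1 with _ | ⟨g, gs⟩
        · simp
        · dsimp only
          rw [show pvLaLoop cur (x :: g) = pvLaLoop cur g by simp [pvLaLoop, hatC]]

-- ===== VERDICT (by name: the statement is the Claim_ definition above) =====
theorem parse_nics_output_py_spec : Claim_equal_parse_nics_output_py := by
  intro output _
  unfold Spec_parse_nics_output_py parse_nics_output_py parse_nics_output_py_alt
  dsimp only
  have hA := pvA_bridge (PySem.Str.splitlines output) [] ([], PySem.Dict.empty)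
  simp only [List.nil_append, List.length_nil, Nat.cast_zero] at hA
  rw [hA]
  have hB := pvB_split_bridge (PySem.Str.splitlines output) [] []
  rcases hr : pvSplitC (PySem.Str.splitlines output) with ⟨gs, rem⟩
  rw [hr] at hB
  rw [pvMain (PySem.Str.splitlines output) [] PySem.Dict.empty, hr]
  cases gs with
  | nil =>
    dsimp only at hB ⊢
    rw [hB]
    simp
  | cons g gs' =>
    dsimp only at hB ⊢
    rw [hB]
    simp only [List.nil_append, List.map_cons]
    congr 1
    · rw [(pvB_block_bridge g).1 PySem.Dict.empty]
    · rw [List.map_map, List.map_map]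
      apply List.map_congr_left
      intro b _
      simp [(pvB_block_bridge b).1 PySem.Dict.empty]
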